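-- pv_equiv track=rewrite | github.com/zachwaugh/adventofcode | 2024/day12.py | count_unique
-- ===== SOURCE A (Python) =====
-- def count_unique(edges):
--     count = 0
--     rows = sorted(edges.keys())
--     previous = None
--     for index, row in enumerate(rows):
--         if previous is None or abs(row - previous) > 1:
--             # add all for first or spaced out rows
--             count += len(edges[row])
--         else:
--             for edge in edges[row]:
--                 # add +1 when not in previous row or if in previous
--                 # row is not the same alignment as other edge
--                 if edge not in edges[previous] or is_leading(
--                     edge, edges[row]
--                 ) != is_leading(edge, edges[previous]):
--                     count += 1
--         previous = row
--     return count
--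
-- def is_leading(edge, edges):
--     points = sorted(edges)
--     return points.index(edge) % 2 == 0
-- ===== SOURCE B (Python) =====
-- def count_unique(edges):
--     # preprocess each row once into a dict edge -> alignment parity (one sort
--     # per row); then count in a single pass, finding the relevant previous row
--     # by direct arithmetic lookup (row - 1) instead of sorting the rows
--     sig = {}
--     for row, es in edges.items():
--         d = {}
--         for i, e in enumerate(sorted(es)):
--             if e not in d:
--                 d[e] = i % 2 == 0
--         sig[row] = d
--     count = 0
--     for row, es in edges.items():
--         prev = sig.get(row - 1)
--         if prev is None:
--             count += len(es)
--         else: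
--             cur = sig[row]
--             for e in es:
--                 if e not in prev or prev[e] != cur[e]:
--                     count += 1
--     return count
-- ===== Notes on version B (the rewrite author's own statement) =====
-- stated objective: alternative
-- what changed: B never sorts the row keys and never re-sorts a row per is_leading call: it preprocesses each row once into a dict edge -> alignment parity (one sort per row), then counts in a single unsorted pass over the rows, finding the relevant previous row by direct lookup of row-1 instead of tracking the predecessor along a sorted row list.
import Mathlib
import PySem

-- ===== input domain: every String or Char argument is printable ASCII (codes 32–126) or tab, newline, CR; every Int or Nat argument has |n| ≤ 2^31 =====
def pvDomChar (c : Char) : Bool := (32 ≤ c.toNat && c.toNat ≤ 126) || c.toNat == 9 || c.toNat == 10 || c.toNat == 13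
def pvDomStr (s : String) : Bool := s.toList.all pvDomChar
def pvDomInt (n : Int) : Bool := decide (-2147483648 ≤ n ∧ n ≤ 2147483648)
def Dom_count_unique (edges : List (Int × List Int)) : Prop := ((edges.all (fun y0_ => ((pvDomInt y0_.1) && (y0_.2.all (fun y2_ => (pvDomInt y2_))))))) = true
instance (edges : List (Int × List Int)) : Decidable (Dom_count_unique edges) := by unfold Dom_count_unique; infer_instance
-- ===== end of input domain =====

-- B preprocesses each row once into an edge->alignment dict and finds the previous row by
-- direct lookup of row-1 instead of sorting rows and re-sorting per is_leading call.


-- ===== PORT A =====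
def is_leading (edge : Int) (edges : List Int) : Bool :=
  let points := PySem.List.sorted edges (fun x => x) false
  match PySem.List.index? points edge with
  | some i => i % 2 == 0
  | none => false  -- unreachable: A only calls is_leading with edge ∈ edges (no ValueError)

def count_unique (edges : List (Int × List Int)) : Int :=
  let d := PySem.Dict.ofList edges
  let rows := PySem.List.sorted d.keys (fun x => x) false
  let st := rows.foldl (fun (st : Int × Option Int) row =>
    match st with
    | (count, none) => (count + ((d.getD row []).length : Int), some row)
    | (count, some previous) =>
      if 1 < (row - previous).natAbs then
        (count + ((d.getD row []).length : Int), some row)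
      else
        ((d.getD row []).foldl (fun count edge =>
          if !(decide (edge ∈ d.getD previous [])) ||
             (is_leading edge (d.getD row []) != is_leading edge (d.getD previous [])) then
            count + 1
          else count) count, some row)) (0, none)
  st.1

-- ===== PORT B =====
-- per-row preprocessing: dict edge -> parity of its first index in the sorted row
def sigOf (es : List Int) : PySem.Dict Int Bool :=
  (PySem.List.enumerate (PySem.List.sorted es (fun x => x) false) 0).foldl
    (fun d p => if d.contains p.2 then d else d.insert p.2 (PySem.Int.mod p.1 2 == 0))
    PySem.Dict.empty

def count_unique_alt (edges : List (Int × List Int)) : Int :=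
  let d := PySem.Dict.ofList edges
  let sig := d.items.foldl (fun s p => s.insert p.1 (sigOf p.2)) PySem.Dict.empty
  d.items.foldl (fun count p =>
    match sig.get? (p.1 - 1) with
    | none => count + (p.2.length : Int)
    | some prev =>
      -- cur = sig[row]: row was inserted into sig above, so the lookup cannot fail
      let cur := (sig.get? p.1).getD PySem.Dict.empty
      p.2.foldl (fun count e =>
        match prev.get? e with
        | none => count + 1
        | some b => if b != cur.getD e false then count + 1 else count) count) 0

-- ===== PRECONDITION & SPEC =====
def Spec_count_unique (edges : List (Int × List Int)) (out : Int) : Prop := out = count_unique_alt edges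
instance (edges : List (Int × List Int)) (out : Int) : Decidable (Spec_count_unique edges out) := by unfold Spec_count_unique; infer_instance

-- ===== CLAIM (what is proved, stated in full; the proofs are below) =====
def Claim_equal_count_unique : Prop := ∀ (edges : List (Int × List Int)), Dom_count_unique edges → Spec_count_unique edges (count_unique edges)

-- ===== LEMMAS AND PROOFS =====

-- a fold whose step is a translation by a per-element amount splits off its accumulator
theorem foldl_translation {α : Type} (f : Int → α → Int)
    (h : ∀ c e, f c e = c + f 0 e) (L : List α) (c : Int) :
    L.foldl f c = c + L.foldl f 0 := by
  induction L generalizing c with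
  | nil => simp
  | cons x xs ih => rw [List.foldl_cons, List.foldl_cons, ih (f c x), ih (f 0 x), h c x]; ring

-- the per-row contribution A produces, phrased against the global dict (previous row = row-1)
def contribA (d : PySem.Dict Int (List Int)) (r : Int) : Int :=
  if (r - 1) ∈ d.keys then
    (d.getD r []).foldl (fun count edge =>
      if !(decide (edge ∈ d.getD (r-1) [])) ||
         (is_leading edge (d.getD r []) != is_leading edge (d.getD (r-1) [])) then
        count + 1
      else count) 0
  else ((d.getD r []).length : Int)

-- sigOf looks up the parity of the first index of e in the sorted row
theorem sigOf_fold_get? (xs : List Int) (n : Int) (d0 : PySem.Dict Int Bool) (e : Int) :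
    ((PySem.List.enumerate xs n).foldl
      (fun d p => if d.contains p.2 then d else d.insert p.2 (PySem.Int.mod p.1 2 == 0)) d0).get? e
    = if d0.contains e then d0.get? e
      else (PySem.List.index? xs e).map (fun i : Nat => (PySem.Int.mod (n + (i : Int)) 2 == 0)) := by
  induction xs generalizing n d0 with
  | nil =>
    by_cases h : d0.contains e
    · simp [PySem.List.enumerate_nil, h]
    · rw [PySem.List.enumerate_nil, List.foldl_nil, if_neg (by simp [h]),
        (PySem.List.index?_eq_none_iff ([] : List Int) e).mpr (by simp),
        (PySem.Dict.get?_eq_none_iff_contains d0 e).mpr (by simp [h])]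
      rfl
  | cons x xs ih =>
    rw [PySem.List.enumerate_cons, List.foldl_cons]
    simp only []
    have hshift : ∀ i : Nat, n + 1 + (i : Int) = n + ((i + 1 : Nat) : Int) := by
      intro i; push_cast; ring
    by_cases hx : e = x
    · subst hx
      by_cases h : d0.contains e
      · rw [if_pos h, ih, if_pos h, if_pos h]
      · rw [if_neg h, ih,
            if_pos (PySem.Dict.contains_insert_self d0 e _),
            PySem.Dict.get?_insert_self, if_neg (by simp [h]),
            PySem.List.index?_cons_self]
        simp
    · have hne : e ≠ x := hx
      by_cases h : d0.contains e
      · by_cases hcx : d0.contains x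
        · rw [if_pos hcx, ih, if_pos h, if_pos h]
        · rw [if_neg hcx, ih,
              if_pos (by rw [PySem.Dict.contains_insert]; simp [h]),
              PySem.Dict.get?_insert_of_ne _ _ hne, if_pos h]
      · by_cases hcx : d0.contains x
        · rw [if_pos hcx, ih, if_neg (by simp [h]), if_neg (by simp [h]),
              PySem.List.index?_cons_of_ne _ (Ne.symm hne)]
          cases PySem.List.index? xs e with
          | none => rfl
          | some i => simp [hshift i]
        · rw [if_neg hcx, ih,
              if_neg (by rw [PySem.Dict.contains_insert]; simp [hne, h]),
              if_neg (by simp [h]),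
              PySem.List.index?_cons_of_ne _ (Ne.symm hne)]
          cases PySem.List.index? xs e with
          | none => rfl
          | some i => simp [hshift i]

-- sigOf agrees with A's is_leading on members, and is none off them
theorem sigOf_get? (es : List Int) (e : Int) :
    (sigOf es).get? e = if e ∈ es then some (is_leading e es) else none := by
  unfold sigOf
  rw [sigOf_fold_get? _ 0 PySem.Dict.empty e,
      if_neg (by simp [PySem.Dict.contains_empty])]
  unfold is_leading
  simp only []
  by_cases h : e ∈ es
  · have hmem : e ∈ PySem.List.sorted es (fun x => x) false :=
      (PySem.List.mem_sorted es (fun x => x) false e).mpr h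
    rcases Option.isSome_iff_exists.mp
      ((PySem.List.index?_isSome_iff (PySem.List.sorted es (fun x => x) false) e).mpr hmem)
      with ⟨i, hi⟩
    rw [hi, if_pos h]
    have hmc : PySem.Int.mod ((i : Int)) 2 = ((i % 2 : Nat) : Int) := by
      exact_mod_cast PySem.Int.mod_natCast i 2
    simp only [Option.map_some, zero_add, hmc]
    rcases Nat.mod_two_eq_zero_or_one i with h2 | h2 <;> simp [h2]
  · rw [if_neg h,
      (PySem.List.index?_eq_none_iff (PySem.List.sorted es (fun x => x) false) e).mpr
        (by simp [PySem.List.mem_sorted, h])]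
    rfl

-- the sig dictionary built over the items of a nodup-key dict
theorem sig_fold_get?_of_not_mem (l : List (Int × List Int))
    (s0 : PySem.Dict Int (PySem.Dict Int Bool)) (k : Int)
    (h : ∀ p ∈ l, p.1 ≠ k) :
    (l.foldl (fun s p => s.insert p.1 (sigOf p.2)) s0).get? k = s0.get? k := by
  induction l generalizing s0 with
  | nil => rfl
  | cons q l ih =>
    rw [List.foldl_cons, ih _ (fun p hp => h p (List.mem_cons_of_mem _ hp)),
        PySem.Dict.get?_insert_of_ne _ _ (Ne.symm (h q List.mem_cons_self))]

theorem sig_fold_get?_of_mem (l : List (Int × List Int)) (k : Int) (v : List Int) :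
    ∀ (s0 : PySem.Dict Int (PySem.Dict Int Bool)),
    (k, v) ∈ l → (l.map Prod.fst).Nodup →
    (l.foldl (fun s p => s.insert p.1 (sigOf p.2)) s0).get? k = some (sigOf v) := by
  induction l with
  | nil => intro s0 h _; cases h
  | cons q l ih =>
    intro s0 hkv hnd
    rw [List.foldl_cons]
    rcases List.mem_cons.mp hkv with h | h
    · have hk : q.1 = k := by rw [← h]
      have hv : q.2 = v := by rw [← h]
      rw [sig_fold_get?_of_not_mem _ _ _ (by
          intro p hp hpk
          apply (List.nodup_cons.mp hnd).1
          rw [hk, ← hpk]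
          exact List.mem_map_of_mem hp),
        hk, hv, PySem.Dict.get?_insert_self]
    · exact ih _ h (List.nodup_cons.mp hnd).2

-- A's inner loop over one row from c equals c + contribA's inner loop from 0
theorem inner_shift (d : PySem.Dict Int (List Int)) (prev row : Int) (L : List Int) (c : Int) :
    L.foldl (fun count edge =>
      if !(decide (edge ∈ d.getD prev [])) ||
         (is_leading edge (d.getD row []) != is_leading edge (d.getD prev [])) then
        count + 1
      else count) c
    = c + L.foldl (fun count edge =>
      if !(decide (edge ∈ d.getD prev [])) ||
         (is_leading edge (d.getD row []) != is_leading edge (d.getD prev [])) then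
        count + 1
      else count) 0 := by
  apply foldl_translation
  intro c' e
  split_ifs <;> ring

-- A's fold over the strictly increasing row list sums the per-row contributions
theorem chainA (d : PySem.Dict Int (List Int)) (rest : List Int) (p c : Int)
    (hpair : (p :: rest).Pairwise (· < ·))
    (hp : p ∈ d.keys)
    (hrest : ∀ y ∈ rest, y ∈ d.keys)
    (hinv : ∀ y ∈ d.keys, y ≤ p ∨ y ∈ rest) :
    (rest.foldl (fun (st : Int × Option Int) row =>
      match st with
      | (count, none) => (count + ((d.getD row []).length : Int), some row)
      | (count, some previous) =>
        if 1 < (row - previous).natAbs then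
          (count + ((d.getD row []).length : Int), some row)
        else
          ((d.getD row []).foldl (fun count edge =>
            if !(decide (edge ∈ d.getD previous [])) ||
               (is_leading edge (d.getD row []) != is_leading edge (d.getD previous [])) then
              count + 1
            else count) count, some row)) (c, some p)).1
    = c + (rest.map (contribA d)).sum := by
  induction rest generalizing p c with
  | nil => simp
  | cons r rs ih =>
    have hpr : p < r := (List.pairwise_cons.mp hpair).1 r List.mem_cons_self
    have hpair' : (r :: rs).Pairwise (· < ·) := (List.pairwise_cons.mp hpair).2
    have hr : r ∈ d.keys := hrest r List.mem_cons_self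
    have hrs : ∀ y ∈ rs, y ∈ d.keys := fun y hy => hrest y (List.mem_cons_of_mem _ hy)
    have hinv' : ∀ y ∈ d.keys, y ≤ r ∨ y ∈ rs := by
      intro y hy
      rcases hinv y hy with h | h
      · exact Or.inl (le_of_lt (lt_of_le_of_lt h hpr))
      · rcases List.mem_cons.mp h with h | h
        · exact Or.inl (le_of_eq h)
        · exact Or.inr h
    simp only [List.foldl_cons, List.map_cons, List.sum_cons]
    by_cases hkey : (r - 1) ∈ d.keys
    · have hpeq : p = r - 1 := by
        rcases hinv (r - 1) hkey with h | h
        · omega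
        · rcases List.mem_cons.mp h with h | h
          · omega
          · exact absurd ((List.pairwise_cons.mp hpair').1 _ h) (by omega)
      have hcond : ¬ 1 < (r - p).natAbs := by omega
      simp only [hcond, if_false]
      rw [ih r _ hpair' hr hrs hinv', inner_shift]
      unfold contribA
      rw [if_pos hkey, hpeq]
      ring
    · have hcond : 1 < (r - p).natAbs := by
        rcases Nat.lt_or_ge 1 (r - p).natAbs with h | h
        · exact h
        · exact absurd (show p = r - 1 by omega) (fun he => hkey (he ▸ hp))
      simp only [hcond, if_true]
      rw [ih r _ hpair' hr hrs hinv']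
      unfold contribA
      rw [if_neg hkey]
      ring

-- a fold whose step adds a per-element amount (for elements of the list) sums them
theorem foldl_eq_sum {α : Type} (l : List α) (f : Int → α → Int) (g : α → Int)
    (h : ∀ c : Int, ∀ p ∈ l, f c p = c + g p) : ∀ c : Int, l.foldl f c = c + (l.map g).sum := by
  induction l with
  | nil => intro c; simp
  | cons x xs ih =>
    intro c
    rw [List.foldl_cons, ih (fun c p hp => h c p (List.mem_cons_of_mem _ hp)),
        h c x List.mem_cons_self, List.map_cons, List.sum_cons]
    ring

-- Dict.getD through get?
theorem getD_eq_get?_getD {ν : Type} (d : PySem.Dict Int ν) (k : Int) (dflt : ν) :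
    d.getD k dflt = (d.get? k).getD dflt := rfl

-- B's per-item step contributes exactly contribA of its key
theorem b_item_contrib (d : PySem.Dict Int (List Int)) (hnd : d.keys.Nodup)
    (sig : PySem.Dict Int (PySem.Dict Int Bool))
    (hsig : ∀ k, sig.get? k = if k ∈ d.keys then some (sigOf (d.getD k [])) else none)
    (p : Int × List Int) (hp : p ∈ d.items) (c : Int) :
    (match sig.get? (p.1 - 1) with
    | none => c + (p.2.length : Int)
    | some prev =>
      let cur := (sig.get? p.1).getD PySem.Dict.empty
      p.2.foldl (fun count e =>
        match prev.get? e with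
        | none => count + 1
        | some b => if b != cur.getD e false then count + 1 else count) c)
    = c + contribA d p.1 := by
  have hv : d.getD p.1 [] = p.2 := PySem.Dict.getD_of_mem_items d hp hnd []
  have hk : p.1 ∈ d.keys := PySem.Dict.mem_keys_of_mem_items d hp
  by_cases hkey : (p.1 - 1) ∈ d.keys
  · rw [show p.2 = d.getD p.1 [] from hv.symm]
    simp only [hsig, if_pos hkey, if_pos hk, Option.getD_some]
    rw [PySem.List.foldl_congr_mem _ _
      (fun count edge =>
        if !(decide (edge ∈ d.getD (p.1 - 1) [])) ||
           (is_leading edge (d.getD p.1 []) != is_leading edge (d.getD (p.1 - 1) [])) then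
          count + 1
        else count) c
      (by
        intro acc e he
        have hcur : (sigOf (d.getD p.1 [])).getD e false = is_leading e (d.getD p.1 []) := by
          rw [getD_eq_get?_getD, sigOf_get?, if_pos he]
          rfl
        by_cases hmem : e ∈ d.getD (p.1 - 1) []
        · simp only [sigOf_get?, hcur, hmem, decide_true, Bool.not_true,
            Bool.false_or, if_true]
          cases is_leading e (d.getD p.1 []) <;>
            cases is_leading e (d.getD (p.1 - 1) []) <;> rfl
        · simp [sigOf_get?, hmem]),
      inner_shift d (p.1 - 1) p.1 (d.getD p.1 []) c]
    unfold contribA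
    rw [if_pos hkey]
  · rw [hsig (p.1 - 1), if_neg hkey]
    unfold contribA
    rw [if_neg hkey, hv]

-- ===== VERDICT (by name: the statement is the Claim_ definition above) =====
theorem count_unique_spec : Claim_equal_count_unique := by
  intro edges _
  unfold Spec_count_unique count_unique count_unique_alt
  simp only []
  set d := PySem.Dict.ofList edges with hd
  have hnd : d.keys.Nodup := PySem.Dict.nodup_keys_ofList edges
  have hkeys_items : d.keys = d.items.map Prod.fst := rfl
  -- the sig dictionary's lookups
  have hsig : ∀ k, (d.items.foldl (fun s p => s.insert p.1 (sigOf p.2)) PySem.Dict.empty).get? k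
      = if k ∈ d.keys then some (sigOf (d.getD k [])) else none := by
    intro k
    by_cases hk : k ∈ d.keys
    · rw [hkeys_items] at hk
      rcases List.mem_map.mp hk with ⟨q, hq, hq1⟩
      rw [if_pos (hkeys_items ▸ hk)]
      have hm : (k, q.2) ∈ d.items := by rw [← hq1]; exact hq
      rw [sig_fold_get?_of_mem d.items k q.2 _ hm (hkeys_items ▸ hnd),
          PySem.Dict.getD_of_mem_items d hm hnd []]
    · rw [if_neg hk, sig_fold_get?_of_not_mem _ _ _ (by
        intro q hq hq1
        exact hk (hq1 ▸ PySem.Dict.mem_keys_of_mem_items d hq))]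
      rfl
  -- B equals the sum of contribA over the keys
  have hB : d.items.foldl (fun count p =>
      match (d.items.foldl (fun s p => s.insert p.1 (sigOf p.2)) PySem.Dict.empty).get? (p.1 - 1) with
      | none => count + (p.2.length : Int)
      | some prev =>
        let cur := ((d.items.foldl (fun s p => s.insert p.1 (sigOf p.2)) PySem.Dict.empty).get? p.1).getD PySem.Dict.empty
        p.2.foldl (fun count e =>
          match prev.get? e with
          | none => count + 1
          | some b => if b != cur.getD e false then count + 1 else count) count) 0
      = ((d.items.map (fun p => contribA d p.1)).sum : Int) := by
    rw [foldl_eq_sum _ _ (fun p => contribA d p.1)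
      (fun c p hp => b_item_contrib d hnd _ hsig p hp c) 0]
    ring
  rw [hB]
  -- A equals the same sum over the sorted keys
  have hperm : (PySem.List.sorted d.keys (fun x => x) false).Perm d.keys :=
    PySem.List.sorted_perm _ _ _
  have hpairlt : (PySem.List.sorted d.keys (fun x => x) false).Pairwise (· < ·) := by
    have hle : (PySem.List.sorted d.keys (fun x => x) false).Pairwise (· ≤ ·) := by
      have := PySem.List.sorted_pairwise (xs := d.keys) (key := fun x => x)
      simpa using this
    have hnd' : (PySem.List.sorted d.keys (fun x => x) false).Nodup :=
      hperm.nodup_iff.mpr hnd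
    exact (hle.and hnd').imp (fun h => lt_of_le_of_ne h.1 h.2)
  have hsum : ((d.items.map (fun p => contribA d p.1)).sum : Int)
      = ((PySem.List.sorted d.keys (fun x => x) false).map (contribA d)).sum := by
    have h1 : d.items.map (fun p => contribA d p.1) = d.keys.map (contribA d) := by
      rw [hkeys_items, List.map_map]; rfl
    rw [h1]
    exact (List.Perm.sum_eq (List.Perm.map _ hperm)).symm
  rw [hsum]
  cases hrows : PySem.List.sorted d.keys (fun x => x) false with
  | nil => simp
  | cons p rest =>
    rw [hrows] at hperm hpairlt
    have hmemk : ∀ y ∈ p :: rest, y ∈ d.keys := fun y hy => hperm.mem_iff.mp hy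
    have hfirst : contribA d p = ((d.getD p []).length : Int) := by
      unfold contribA
      rw [if_neg (by
        intro hcon
        have hle := PySem.List.key_head_sorted_le (xs := d.keys) (key := fun x => x) hrows (p - 1) hcon
        simp only [] at hle
        omega)]
    rw [List.foldl_cons]
    simp only [List.map_cons, List.sum_cons]
    rw [chainA d rest p _ hpairlt (hmemk p List.mem_cons_self)
        (fun y hy => hmemk y (List.mem_cons_of_mem _ hy))
        (by
          intro y hy
          rcases List.mem_cons.mp (hperm.mem_iff.mpr hy) with h | h
          · exact Or.inl (le_of_eq h)
          · exact Or.inr h),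
      hfirst]
    ring
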